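-- pv_equiv track=rewrite | github.com/sravs1573/DocuAgent | utils/confidence_scoring.py | find_keyword_near_value
-- ===== SOURCE A (Python) =====
-- def find_keyword_near_value(keyword: str, field_value: str, source_text: str, window: int = 50) -> bool:
--     """Check if keyword appears near field value in source text"""
--     if not all([keyword, field_value, source_text]):
--         return False
--
--     source_lower = source_text.lower()
--     keyword_lower = keyword.lower()
--     value_lower = field_value.lower()
--
--     # Find all occurrences of the field value
--     value_positions = []
--     start = 0
--     while True:
--         pos = source_lower.find(value_lower, start)
--         if pos == -1:
--             break
--         value_positions.append(pos)
--         start = pos + 1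
--
--     # Check if keyword appears within window of any value occurrence
--     for pos in value_positions:
--         window_start = max(0, pos - window)
--         window_end = min(len(source_lower), pos + len(value_lower) + window)
--         window_text = source_lower[window_start:window_end]
--
--         if keyword_lower in window_text:
--             return True
--
--     return False
-- ===== SOURCE B (Python) =====
-- def find_keyword_near_value(keyword: str, field_value: str, source_text: str, window: int = 50) -> bool:
--     """Check if keyword appears near field value in source text.
--
--     Re-implementation: one pass over every index with str.startswith collects the
--     keyword start positions; a second index pass tests each value start position
--     against the keyword positions with pure integer window inequalities (no
--     substring slicing or per-window rescans).
--     """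
--     if not keyword or not field_value or not source_text:
--         return False
--
--     src = source_text.lower()
--     kw = keyword.lower()
--     vl = field_value.lower()
--
--     n = len(src)
--     kw_positions = [j for j in range(n) if src.startswith(kw, j)]
--     lk, lv = len(kw), len(vl)
--
--     for i in range(n):
--         if src.startswith(vl, i) and any(
--             i - window <= j and j + lk <= i + lv + window for j in kw_positions
--         ):
--             return True
--     return False
-- ===== Notes on version B (the rewrite author's own statement) =====
-- stated objective: alternative
-- what changed: B replaces A's find-loop plus per-occurrence window slicing and substring rescans by two index scans with str.startswith (collecting keyword start positions once) and pure integer window inequalities; B does not reproduce A's negative-window_end slice wraparound (see differs).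
-- intended difference: On inputs where some value occurrence pos has pos + len(value) + window < 0 (only possible for a very negative window), A's negative window_end makes Python slice from the end of the string, so A can return True for a keyword occurrence far outside the window while B returns False; B's False is the intended meaning of 'keyword within window characters of the value'. — e.g. on find_keyword_near_value("a", "a", "aaaa", -2): A returns true, B returns false
import Mathlib
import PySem

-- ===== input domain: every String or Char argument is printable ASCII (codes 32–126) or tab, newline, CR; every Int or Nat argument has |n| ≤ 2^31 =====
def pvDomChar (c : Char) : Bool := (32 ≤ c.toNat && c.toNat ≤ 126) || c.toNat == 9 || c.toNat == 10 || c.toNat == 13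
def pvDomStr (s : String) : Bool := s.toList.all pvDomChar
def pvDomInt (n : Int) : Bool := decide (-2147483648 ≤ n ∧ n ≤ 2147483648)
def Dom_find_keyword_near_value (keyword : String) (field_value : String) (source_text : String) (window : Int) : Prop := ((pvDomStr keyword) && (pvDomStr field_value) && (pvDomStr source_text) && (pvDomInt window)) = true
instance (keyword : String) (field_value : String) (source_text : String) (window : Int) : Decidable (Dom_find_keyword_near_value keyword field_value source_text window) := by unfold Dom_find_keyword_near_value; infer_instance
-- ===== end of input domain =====

-- B replaces A's find-loop-plus-window-slicing with two startswith index scans and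
-- integer window inequalities; B deliberately does NOT reproduce A's slice
-- wraparound for a very negative window (see D_ below).

-- ===== PORT A =====
-- A's `while True: pos = source_lower.find(value_lower, start) …` loop; the fuel argument
-- (always called with src.length + 1, enough for the ≤ length+1 iterations) only makes the
-- recursion structural, it never changes the computed list.
def pvFindLoopA (src val : List Char) (fuel : Nat) (start : Nat) : List Nat :=
  match fuel with
  | 0 => []
  | fuel + 1 =>
    let pos := PySem.Chars.findFrom src val (start : Int) none
    if pos = -1 then []
    else pos.toNat :: pvFindLoopA src val fuel (pos.toNat + 1)

def find_keyword_near_value (keyword : String) (field_value : String) (source_text : String) (window : Int) : Bool :=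
  -- `if not all([keyword, field_value, source_text]): return False`
  if keyword.toList = [] ∨ field_value.toList = [] ∨ source_text.toList = [] then false
  else
    let source_lower := PySem.Chars.lower source_text.toList
    let keyword_lower := PySem.Chars.lower keyword.toList
    let value_lower := PySem.Chars.lower field_value.toList
    let value_positions := pvFindLoopA source_lower value_lower (source_lower.length + 1) 0
    -- `for pos in value_positions: … if keyword_lower in window_text: return True` / `return False`
    value_positions.any (fun pos =>
      let window_start : Int := max 0 ((pos : Int) - window)
      let window_end : Int := min ((source_lower.length : Int)) ((pos : Int) + (value_lower.length : Int) + window)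
      PySem.Chars.isIn keyword_lower (PySem.Chars.slice source_lower (some window_start) (some window_end)))

-- ===== PORT B =====
-- `src.startswith(sub, j)` for 0 ≤ j ≤ len(src): sub is a prefix of src[j:].
-- Source B's `for i in range(n): if …: return True` / `return False` loop, early return and all.
def pvScanB (src vl : List Char) (kps : List Nat) (lk lv window : Int) : List Nat → Bool
  | [] => false
  | i :: rest =>
    if vl.isPrefixOf (src.drop i) &&
        kps.any (fun j => decide ((i : Int) - window ≤ (j : Int) ∧ (j : Int) + lk ≤ (i : Int) + lv + window))
    then true
    else pvScanB src vl kps lk lv window rest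

def find_keyword_near_value_alt (keyword : String) (field_value : String) (source_text : String) (window : Int) : Bool :=
  if keyword.toList.isEmpty || field_value.toList.isEmpty || source_text.toList.isEmpty then false
  else
    let src := PySem.Chars.lower source_text.toList
    let kw := PySem.Chars.lower keyword.toList
    let vl := PySem.Chars.lower field_value.toList
    let n := src.length
    let kw_positions := (List.range n).filter (fun j => kw.isPrefixOf (src.drop j))
    pvScanB src vl kw_positions (kw.length : Int) (vl.length : Int) window (List.range n)

-- ===== PRECONDITION & SPEC =====
-- On inputs where some value occurrence pos has pos + len(value) + window < 0 (only possible for a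
-- very negative window), A's window_end is a negative int that Python's slicing counts from the END
-- of the string, so A can return True for a keyword occurrence far outside the stated window while
-- B returns False; B's False is the intended reading of "keyword within `window` characters".
def D_find_keyword_near_value (keyword : String) (field_value : String) (source_text : String) (window : Int) : Prop :=
  let src := PySem.Chars.lower source_text.toList
  let kw := PySem.Chars.lower keyword.toList
  let vl := PySem.Chars.lower field_value.toList
  window + vl.length < 0 ∧ kw ≠ [] ∧ vl ≠ [] ∧
  ∃ i < src.length, ∃ j < src.length, vl <+: src.drop i ∧ kw <+: src.drop j ∧
    i - window ≤ j ∧ i + vl.length + window < 0 ∧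
    j + kw.length ≤ src.length + (i + vl.length + window)
instance (keyword : String) (field_value : String) (source_text : String) (window : Int) : Decidable (D_find_keyword_near_value keyword field_value source_text window) := by unfold D_find_keyword_near_value; infer_instance

def Spec_find_keyword_near_value (keyword : String) (field_value : String) (source_text : String) (window : Int) (out : Bool) : Prop := ¬ D_find_keyword_near_value keyword field_value source_text window → out = find_keyword_near_value_alt keyword field_value source_text window
instance (keyword : String) (field_value : String) (source_text : String) (window : Int) (out : Bool) : Decidable (Spec_find_keyword_near_value keyword field_value source_text window out) := by unfold Spec_find_keyword_near_value; infer_instance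

def pvDiffWitness_find_keyword_near_value : String × String × String × Int := ("a", "a", "aaaa", -2)
def pvDiffWitnessOut_find_keyword_near_value : Bool × Bool := (true, false)

-- ===== CLAIM (what is proved, stated in full; the proofs are below) =====
def Claim_unchanged_find_keyword_near_value : Prop := ∀ (keyword : String) (field_value : String) (source_text : String) (window : Int), Dom_find_keyword_near_value keyword field_value source_text window → Spec_find_keyword_near_value keyword field_value source_text window (find_keyword_near_value keyword field_value source_text window)
def Claim_changed_find_keyword_near_value : Prop := Dom_find_keyword_near_value (pvDiffWitness_find_keyword_near_value.1) (pvDiffWitness_find_keyword_near_value.2.1) (pvDiffWitness_find_keyword_near_value.2.2.1) (pvDiffWitness_find_keyword_near_value.2.2.2) ∧ D_find_keyword_near_value (pvDiffWitness_find_keyword_near_value.1) (pvDiffWitness_find_keyword_near_value.2.1) (pvDiffWitness_find_keyword_near_value.2.2.1) (pvDiffWitness_find_keyword_near_value.2.2.2) ∧ find_keyword_near_value (pvDiffWitness_find_keyword_near_value.1) (pvDiffWitness_find_keyword_near_value.2.1) (pvDiffWitness_find_keyword_near_value.2.2.1) (pvDiffWitness_find_keyword_near_value.2.2.2) = pvDiffWitnessOut_find_keyword_near_value.1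 ∧ find_keyword_near_value_alt (pvDiffWitness_find_keyword_near_value.1) (pvDiffWitness_find_keyword_near_value.2.1) (pvDiffWitness_find_keyword_near_value.2.2.1) (pvDiffWitness_find_keyword_near_value.2.2.2) = pvDiffWitnessOut_find_keyword_near_value.2 ∧ pvDiffWitnessOut_find_keyword_near_value.1 ≠ pvDiffWitnessOut_find_keyword_near_value.2
def Claim_exact_find_keyword_near_value : Prop := ∀ (keyword : String) (field_value : String) (source_text : String) (window : Int), Dom_find_keyword_near_value keyword field_value source_text window → D_find_keyword_near_value keyword field_value source_text window → find_keyword_near_value keyword field_value source_text window ≠ find_keyword_near_value_alt keyword field_value source_text window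

-- ===== LEMMAS AND PROOFS =====

-- Lowercasing (a map) preserves (non)emptiness.
theorem pvLower_ne_nil (l : List Char) : PySem.Chars.lower l ≠ [] ↔ l ≠ [] := by
  simp [PySem.Chars.lower]

-- `s.find(sub, start)` with start past the end is -1.
theorem pvFindFrom_of_length_lt (s sub : List Char) (k : Nat) (h : s.length < k) :
    PySem.Chars.findFrom s sub (k : Int) none = -1 := by
  simp only [PySem.Chars.findFrom]
  rw [if_pos]
  omega

-- A nonempty pattern occurring at position i keeps i strictly inside the text.
theorem pvOcc_lt (src vl : List Char) (hvl : vl ≠ []) {i : Nat} (h : vl <+: src.drop i) :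
    i < src.length := by
  have h1 := h.length_le
  have h2 : 0 < vl.length := List.length_pos_iff.mpr hvl
  simp only [List.length_drop] at h1
  omega

-- The find loop collects exactly the occurrence positions ≥ start (given enough fuel).
theorem pvMem_findLoopA (src val : List Char) (hval : val ≠ []) (fuel : Nat) :
    ∀ (start j : Nat), src.length + 1 ≤ fuel + start →
      (j ∈ pvFindLoopA src val fuel start ↔ start ≤ j ∧ val <+: src.drop j) := by
  have hlv : 0 < val.length := List.length_pos_iff.mpr hval
  have occ_bound : ∀ j : Nat, val <+: src.drop j → j + val.length ≤ src.length := by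
    intro j hj
    have := hj.length_le
    simp only [List.length_drop] at this
    omega
  induction fuel with
  | zero =>
    intro start j hfuel
    simp only [pvFindLoopA, List.not_mem_nil, false_iff]
    rintro ⟨h1, h2⟩
    have := occ_bound j h2
    omega
  | succ fuel ih =>
    intro start j hfuel
    simp only [pvFindLoopA]
    by_cases hs : start ≤ src.length
    · rcases eq_or_ne (PySem.Chars.findFrom src val (start : Int) none) (-1) with hp | hp
      · rw [if_pos hp]
        simp only [List.not_mem_nil, false_iff]
        rintro ⟨h1, h2⟩
        have hinf : val <:+: src.drop start := by
          have : List.drop j src = List.drop (j - start) (List.drop start src) := by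
            rw [List.drop_drop]; congr 1; omega
          rw [this] at h2
          exact h2.isInfix.trans (List.drop_suffix _ _).isInfix
        exact ((PySem.Chars.findFrom_natCast_eq_neg_one_iff src val start hs).mp hp) hinf
      · obtain ⟨hge, hpre, hmin⟩ := PySem.Chars.findFrom_natCast_spec src val start hs hp
        set p := PySem.Chars.findFrom src val (start : Int) none with hpdef
        have hge' : start ≤ p.toNat := by omega
        have hplen : p.toNat + val.length ≤ src.length := occ_bound _ hpre
        rw [if_neg hp]
        rw [List.mem_cons, ih (p.toNat + 1) j (by omega)]
        constructor
        · rintro (rfl | ⟨h1, h2⟩)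
          · exact ⟨hge', hpre⟩
          · exact ⟨by omega, h2⟩
        · rintro ⟨h1, h2⟩
          rcases Nat.lt_or_ge j (p.toNat + 1) with hlt | hge2
          · left
            rcases Nat.lt_or_ge j p.toNat with hlt2 | _
            · exact absurd h2 (hmin j h1 hlt2)
            · omega
          · right; exact ⟨hge2, h2⟩
    · rw [if_pos (pvFindFrom_of_length_lt src val start (by omega))]
      simp only [List.not_mem_nil, false_iff]
      rintro ⟨h1, h2⟩
      have := occ_bound j h2
      omega

-- `kw in src[ws:we]` (0 ≤ ws) says: some occurrence of kw fits between ws and the clamped end.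
theorem pvIsIn_slice (src kw : List Char) (hk : kw ≠ []) (ws we : Int) (hws : 0 ≤ ws) :
    (PySem.Chars.isIn kw (PySem.List.slice src (some ws) (some we)) = true ↔
      ∃ j : Nat, kw <+: src.drop j ∧ ws ≤ (j : Int) ∧
        (j : Int) + (kw.length : Int) ≤ ((PySem.List.clampIdx src.length we : Nat) : Int)) := by
  have hlk : 0 < kw.length := List.length_pos_iff.mpr hk
  set n := src.length with hn
  set a := PySem.List.clampIdx n ws with ha
  set b := PySem.List.clampIdx n we with hb
  have hsl : PySem.List.slice src (some ws) (some we) = (src.drop a).take (b - a) := by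
    simp only [PySem.List.slice, ← ha, ← hb, ← hn]
  have haval : a = min ws.toNat n := by
    rw [ha, ← Int.toNat_of_nonneg hws, PySem.List.clampIdx_natCast, Int.toNat_natCast]
  have hbn : b ≤ n := PySem.List.clampIdx_le n we
  rw [hsl, ← PySem.Chars.exists_prefix_drop_iff_isIn]
  constructor
  · rintro ⟨d, hd⟩
    rw [List.drop_take, List.drop_drop] at hd
    rw [List.prefix_take_iff] at hd
    obtain ⟨hpre, hlen⟩ := hd
    have hocc : d + a + kw.length ≤ n := by
      have := hpre.length_le
      simp only [List.length_drop] at this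
      omega
    refine ⟨a + d, hpre, by omega, by push_cast; omega⟩
  · rintro ⟨j, hpre, hwsj, hjb⟩
    have hocc : j + kw.length ≤ n := by
      have := hpre.length_le
      simp only [List.length_drop] at this
      omega
    have haj : a ≤ j := by omega
    refine ⟨j - a, ?_⟩
    rw [List.drop_take, List.drop_drop, List.prefix_take_iff]
    have hj : a + (j - a) = j := by omega
    rw [hj]
    exact ⟨hpre, by omega⟩

-- Core of A: its any/slice/isIn scan hits iff some pair of occurrences fits A's clamped window.
theorem pvCharCoreA (src kw vl : List Char) (hkl : kw ≠ []) (hvl : vl ≠ []) (window : Int) :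
    ((pvFindLoopA src vl (src.length + 1) 0).any (fun pos =>
        PySem.Chars.isIn kw (PySem.Chars.slice src
          (some (max 0 ((pos : Int) - window)))
          (some (min ((src.length : Int)) ((pos : Int) + (vl.length : Int) + window))))) = true ↔
      ∃ i < src.length, ∃ j < src.length, vl <+: src.drop i ∧ kw <+: src.drop j ∧
        (i : Int) - window ≤ (j : Int) ∧
        (j : Int) + (kw.length : Int) ≤
          ((PySem.List.clampIdx src.length
            (min ((src.length : Int)) ((i : Int) + (vl.length : Int) + window)) : Nat) : Int)) := by
  rw [List.any_eq_true]
  constructor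
  · rintro ⟨i, hi, hin⟩
    rw [pvMem_findLoopA src vl hvl _ 0 i (by omega)] at hi
    rw [PySem.Chars.slice_eq_listSlice,
      pvIsIn_slice src kw hkl _ _ (le_max_left _ _)] at hin
    obtain ⟨j, hoj, hwsj, hjb⟩ := hin
    refine ⟨i, pvOcc_lt src vl hvl hi.2, j, pvOcc_lt src kw hkl hoj, hi.2, hoj, ?_, hjb⟩
    rw [max_le_iff] at hwsj
    exact hwsj.2
  · rintro ⟨i, _, j, _, hoi, hoj, h1, h2⟩
    refine ⟨i, ?_, ?_⟩
    · rw [pvMem_findLoopA src vl hvl _ 0 i (by omega)]; exact ⟨Nat.zero_le _, hoi⟩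
    · rw [PySem.Chars.slice_eq_listSlice, pvIsIn_slice src kw hkl _ _ (le_max_left _ _)]
      refine ⟨j, hoj, ?_, h2⟩
      rw [max_le_iff]
      exact ⟨Int.natCast_nonneg j, h1⟩

-- Characterization of port A's value.
theorem pvCharA (keyword field_value source_text : String) (window : Int) :
    (find_keyword_near_value keyword field_value source_text window = true ↔
      keyword.toList ≠ [] ∧ field_value.toList ≠ [] ∧ source_text.toList ≠ [] ∧
      (∃ i < (PySem.Chars.lower source_text.toList).length, ∃ j < (PySem.Chars.lower source_text.toList).length,
          PySem.Chars.lower field_value.toList <+: (PySem.Chars.lower source_text.toList).drop i ∧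
          PySem.Chars.lower keyword.toList <+: (PySem.Chars.lower source_text.toList).drop j ∧
          (i : Int) - window ≤ (j : Int) ∧
          (j : Int) + ((PySem.Chars.lower keyword.toList).length : Int) ≤
            ((PySem.List.clampIdx (PySem.Chars.lower source_text.toList).length
              (min ((PySem.Chars.lower source_text.toList).length : Int)
                   ((i : Int) + ((PySem.Chars.lower field_value.toList).length : Int) + window)) : Nat) : Int))) := by
  unfold find_keyword_near_value
  by_cases hg : keyword.toList = [] ∨ field_value.toList = [] ∨ source_text.toList = []
  · rw [if_pos hg]
    simp only [Bool.false_eq_true, false_iff]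
    rintro ⟨h1, h2, h3, -⟩
    tauto
  · rw [if_neg hg]
    push Not at hg
    obtain ⟨hk, hv, hs⟩ := hg
    have hkl : PySem.Chars.lower keyword.toList ≠ [] := by
      simp only [PySem.Chars.lower, ne_eq, List.map_eq_nil_iff]; exact hk
    have hvl : PySem.Chars.lower field_value.toList ≠ [] := by
      simp only [PySem.Chars.lower, ne_eq, List.map_eq_nil_iff]; exact hv
    have hcore := pvCharCoreA (PySem.Chars.lower source_text.toList)
      (PySem.Chars.lower keyword.toList) (PySem.Chars.lower field_value.toList) hkl hvl window
    constructor
    · intro h; exact ⟨hk, hv, hs, hcore.mp h⟩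
    · rintro ⟨-, -, -, h⟩; exact hcore.mpr h

-- The early-return scan is `any` of its condition over the index list.
theorem pvScanB_eq_any (src vl : List Char) (kps : List Nat) (lk lv window : Int) :
    ∀ idxs : List Nat, pvScanB src vl kps lk lv window idxs =
      idxs.any (fun i => vl.isPrefixOf (src.drop i) &&
        kps.any (fun j => decide ((i : Int) - window ≤ (j : Int) ∧ (j : Int) + lk ≤ (i : Int) + lv + window))) := by
  intro idxs
  induction idxs with
  | nil => rfl
  | cons i rest ih =>
    simp only [pvScanB, List.any_cons, ih]
    cases h : (vl.isPrefixOf (src.drop i) &&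
        kps.any (fun j => decide ((i : Int) - window ≤ (j : Int) ∧ (j : Int) + lk ≤ (i : Int) + lv + window))) <;>
      simp

-- Characterization of port B's value: the range/startswith scans hit iff some pair of
-- occurrences satisfies the straight (unclamped) window inequalities.
theorem pvCharB (keyword field_value source_text : String) (window : Int) :
    (find_keyword_near_value_alt keyword field_value source_text window = true ↔
      keyword.toList ≠ [] ∧ field_value.toList ≠ [] ∧ source_text.toList ≠ [] ∧
      (∃ i < (PySem.Chars.lower source_text.toList).length, ∃ j < (PySem.Chars.lower source_text.toList).length,
          PySem.Chars.lower field_value.toList <+: (PySem.Chars.lower source_text.toList).drop i ∧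
          PySem.Chars.lower keyword.toList <+: (PySem.Chars.lower source_text.toList).drop j ∧
          (i : Int) - window ≤ (j : Int) ∧
          (j : Int) + ((PySem.Chars.lower keyword.toList).length : Int) ≤
            (i : Int) + ((PySem.Chars.lower field_value.toList).length : Int) + window)) := by
  unfold find_keyword_near_value_alt
  by_cases hg : keyword.toList.isEmpty || field_value.toList.isEmpty || source_text.toList.isEmpty
  · rw [if_pos hg]
    simp only [Bool.or_eq_true, List.isEmpty_iff] at hg
    simp only [Bool.false_eq_true, false_iff]
    rintro ⟨h1, h2, h3, -⟩
    tauto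
  · rw [if_neg hg]
    simp only [Bool.or_eq_true, List.isEmpty_iff, not_or] at hg
    obtain ⟨⟨hk, hv⟩, hs⟩ := hg
    rw [pvScanB_eq_any]
    simp only [List.any_eq_true, List.mem_range, List.mem_filter,
      Bool.and_eq_true, List.isPrefixOf_iff_prefix, decide_eq_true_iff]
    constructor
    · rintro ⟨i, hi, hvi, j, ⟨hj, hkj⟩, hle1, hle2⟩
      exact ⟨hk, hv, hs, i, hi, j, hj, hvi, hkj, hle1, hle2⟩
    · rintro ⟨-, -, -, i, hi, j, hj, hvi, hkj, hle1, hle2⟩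
      exact ⟨i, hi, hvi, j, ⟨hj, hkj⟩, hle1, hle2⟩

-- B's numeric condition implies A's clamped one (the converse can fail only via the wraparound).
theorem pvHitB_imp_hitA (src kw vl : List Char) (window : Int)
    (h : ∃ i < src.length, ∃ j < src.length, vl <+: src.drop i ∧ kw <+: src.drop j ∧
          (i : Int) - window ≤ (j : Int) ∧
          (j : Int) + (kw.length : Int) ≤ (i : Int) + (vl.length : Int) + window) :
    ∃ i < src.length, ∃ j < src.length, vl <+: src.drop i ∧ kw <+: src.drop j ∧
          (i : Int) - window ≤ (j : Int) ∧
          (j : Int) + (kw.length : Int) ≤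
            ((PySem.List.clampIdx src.length
              (min (src.length : Int) ((i : Int) + (vl.length : Int) + window)) : Nat) : Int) := by
  obtain ⟨i, hi, j, hj, hv, hk, h1, h2⟩ := h
  refine ⟨i, hi, j, hj, hv, hk, h1, ?_⟩
  have hjl : kw.length ≤ src.length - j := by
    have := hk.length_le; simpa using this
  set raw : Int := (i : Int) + (vl.length : Int) + window with hraw
  have h0 : (0:Int) ≤ min (src.length : Int) raw := by
    rw [le_min_iff]; omega
  have hcl : PySem.List.clampIdx src.length (min (src.length : Int) raw)
      = min (min (src.length : Int) raw).toNat src.length := by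
    have := PySem.List.clampIdx_natCast src.length (min (src.length : Int) raw).toNat
    rwa [Int.toNat_of_nonneg h0] at this
  rw [hcl]
  push_cast
  omega

-- Inside the wraparound region the clamped end is length + raw end, so A's condition holds.
theorem pvWrap_hitA (src kw vl : List Char) (hkl : kw ≠ []) (window : Int)
    (h : ∃ i < src.length, ∃ j < src.length, vl <+: src.drop i ∧ kw <+: src.drop j ∧
          i - window ≤ j ∧ i + vl.length + window < 0 ∧
          j + kw.length ≤ src.length + (i + vl.length + window)) :
    ∃ i < src.length, ∃ j < src.length, vl <+: src.drop i ∧ kw <+: src.drop j ∧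
          (i : Int) - window ≤ (j : Int) ∧
          (j : Int) + (kw.length : Int) ≤
            ((PySem.List.clampIdx src.length
              (min (src.length : Int) ((i : Int) + (vl.length : Int) + window)) : Nat) : Int) := by
  obtain ⟨i, hi, j, hj, hv, hk, h1, hneg, h2⟩ := h
  refine ⟨i, hi, j, hj, hv, hk, h1, ?_⟩
  set raw : Int := (i : Int) + (vl.length : Int) + window with hraw
  have hmin : min (src.length : Int) raw = raw := min_eq_right (by omega)
  have hcl : PySem.List.clampIdx src.length raw = src.length - (-raw).toNat := by
    have := PySem.List.clampIdx_neg_natCast src.length (-raw).toNat (by omega)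
    rwa [show -(((-raw).toNat : Int)) = raw by omega] at this
  rw [hmin, hcl]
  have hlk : 0 < kw.length := List.length_pos_iff.mpr hkl
  omega

-- Conversely: an A-hit that is no B-hit can only be a wraparound hit.
theorem pvHitA_not_hitB_wrap (src kw vl : List Char) (hkl : kw ≠ []) (window : Int)
    (hEA : ∃ i < src.length, ∃ j < src.length, vl <+: src.drop i ∧ kw <+: src.drop j ∧
          (i : Int) - window ≤ (j : Int) ∧
          (j : Int) + (kw.length : Int) ≤
            ((PySem.List.clampIdx src.length
              (min (src.length : Int) ((i : Int) + (vl.length : Int) + window)) : Nat) : Int))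
    (hnEB : ¬ ∃ i < src.length, ∃ j < src.length, vl <+: src.drop i ∧ kw <+: src.drop j ∧
          (i : Int) - window ≤ (j : Int) ∧
          (j : Int) + (kw.length : Int) ≤ (i : Int) + (vl.length : Int) + window) :
    ∃ i < src.length, ∃ j < src.length, vl <+: src.drop i ∧ kw <+: src.drop j ∧
          i - window ≤ j ∧ i + vl.length + window < 0 ∧
          j + kw.length ≤ src.length + (i + vl.length + window) := by
  obtain ⟨i, hi, j, hj, hv, hk, h1, h2⟩ := hEA
  have hlk : 0 < kw.length := List.length_pos_iff.mpr hkl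
  set raw : Int := (i : Int) + (vl.length : Int) + window with hraw
  rcases lt_or_ge raw 0 with hneg | hpos
  · refine ⟨i, hi, j, hj, hv, hk, h1, hneg, ?_⟩
    have hmin : min (src.length : Int) raw = raw := min_eq_right (by omega)
    rw [hmin] at h2
    have hcl : PySem.List.clampIdx src.length raw = src.length - (-raw).toNat := by
      have := PySem.List.clampIdx_neg_natCast src.length (-raw).toNat (by omega)
      rwa [show -(((-raw).toNat : Int)) = raw by omega] at this
    rw [hcl] at h2
    omega
  · exfalso
    refine hnEB ⟨i, hi, j, hj, hv, hk, h1, ?_⟩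
    have h0 : (0:Int) ≤ min (src.length : Int) raw := by rw [le_min_iff]; omega
    have hcl : PySem.List.clampIdx src.length (min (src.length : Int) raw)
        = min (min (src.length : Int) raw).toNat src.length := by
      have := PySem.List.clampIdx_natCast src.length (min (src.length : Int) raw).toNat
      rwa [Int.toNat_of_nonneg h0] at this
    rw [hcl] at h2
    push_cast at h2
    omega

-- A wraparound hit forces window < -len(value), which makes any straight (B-style) hit impossible.
theorem pvWrap_not_hitB (src kw vl : List Char) (window : Int)
    (hW : ∃ i < src.length, ∃ j < src.length, vl <+: src.drop i ∧ kw <+: src.drop j ∧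
          i - window ≤ j ∧ i + vl.length + window < 0 ∧
          j + kw.length ≤ src.length + (i + vl.length + window)) :
    ¬ ∃ i < src.length, ∃ j < src.length, vl <+: src.drop i ∧ kw <+: src.drop j ∧
          (i : Int) - window ≤ (j : Int) ∧
          (j : Int) + (kw.length : Int) ≤ (i : Int) + (vl.length : Int) + window := by
  obtain ⟨i0, -, j0, -, -, -, -, hneg, -⟩ := hW
  rintro ⟨i, -, j, -, -, -, h1, h2⟩
  omega

-- ===== VERDICT (by name: the statement is the Claim_ definition above) =====
theorem find_keyword_near_value_spec : Claim_unchanged_find_keyword_near_value := by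
  intro keyword field_value source_text window _ hnD
  rcases hA : find_keyword_near_value keyword field_value source_text window with _ | _ <;>
    rcases hB : find_keyword_near_value_alt keyword field_value source_text window with _ | _
  · rfl
  · -- A false, B true: B's hit implies A's hit, contradiction
    exfalso
    obtain ⟨h1, h2, h3, hEB⟩ := (pvCharB keyword field_value source_text window).mp hB
    have := (pvCharA keyword field_value source_text window).mpr
      ⟨h1, h2, h3, pvHitB_imp_hitA _ _ _ window hEB⟩
    simp [hA] at this
  · -- A true, B false: would put the input inside D_
    exfalso
    obtain ⟨h1, h2, h3, hEA⟩ := (pvCharA keyword field_value source_text window).mp hA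
    have hkl : PySem.Chars.lower keyword.toList ≠ [] := by
      simp only [PySem.Chars.lower, ne_eq, List.map_eq_nil_iff]; exact h1
    have hnEB : ¬ _ := fun hEB => by
      have := (pvCharB keyword field_value source_text window).mpr ⟨h1, h2, h3, hEB⟩
      simp [hB] at this
    have hWr := pvHitA_not_hitB_wrap _ _ _ hkl window hEA hnEB
    have hg : window + ((PySem.Chars.lower field_value.toList).length : Int) < 0 := by
      obtain ⟨i, -, j, -, -, -, -, hneg, -⟩ := hWr
      omega
    exact hnD ⟨hg, hkl, (pvLower_ne_nil _).mpr h2, hWr⟩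
  · rfl

theorem find_keyword_near_value_changed : Claim_changed_find_keyword_near_value := by
  unfold Claim_changed_find_keyword_near_value; decide

theorem find_keyword_near_value_tight : Claim_exact_find_keyword_near_value := by
  intro keyword field_value source_text window _ hD
  obtain ⟨-, h1, h2, hW⟩ := hD
  have hsrc : PySem.Chars.lower source_text.toList ≠ [] := by
    obtain ⟨i, hi, -⟩ := hW
    exact List.ne_nil_of_length_pos (by omega)
  have hA : find_keyword_near_value keyword field_value source_text window = true :=
    (pvCharA keyword field_value source_text window).mpr
      ⟨(pvLower_ne_nil _).mp h1, (pvLower_ne_nil _).mp h2, (pvLower_ne_nil _).mp hsrc,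
        pvWrap_hitA _ _ _ h1 window hW⟩
  have hB : find_keyword_near_value_alt keyword field_value source_text window ≠ true := fun hB =>
    pvWrap_not_hitB _ _ _ window hW ((pvCharB keyword field_value source_text window).mp hB).2.2.2
  simp only [hA]
  exact fun h => hB h.symm
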